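-- pv_equiv track=rewrite | github.com/james5635/GeekForGeek-Data-Structure-and-Algorithm | hashing/hard/sum_unique_subarray_sums/solution.py | sum_unique_subarray_sums_optimized
-- ===== SOURCE A (Python) =====
-- from typing import List, Set
--
-- def sum_unique_subarray_sums_optimized(arr: List[int]) -> int:
--     """
--     Optimized approach using prefix sums.
--
--     Time Complexity: O(n^2)
--     Space Complexity: O(n^2)
--     """
--     n = len(arr)
--
--     # Calculate prefix sums
--     prefix_sum = [0] * (n + 1)
--     for i in range(n):
--         prefix_sum[i + 1] = prefix_sum[i] + arr[i]
--
--     unique_sums = set()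
--
--     # All subarray sums can be computed as prefix_sum[j+1] - prefix_sum[i]
--     for i in range(n):
--         for j in range(i, n):
--             subarray_sum = prefix_sum[j + 1] - prefix_sum[i]
--             unique_sums.add(subarray_sum)
--
--     return sum(unique_sums)
-- ===== SOURCE B (Python) =====
-- def sum_unique_subarray_sums_optimized(arr):
--     """DP over subarrays ENDING at each position: one left-to-right pass that
--     maintains the list of sums of subarrays ending at the current element
--     (extend each by the new element, then start a fresh one), pouring each
--     batch into the set. No index loops, no prefix table."""
--     unique_sums = set()
--     ending_here = []
--     for x in arr:
--         ending_here = [s + x for s in ending_here]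
--         ending_here.append(x)
--         unique_sums.update(ending_here)
--     return sum(unique_sums)
-- ===== Notes on version B (the rewrite author's own statement) =====
-- stated objective: alternative
-- what changed: Replaced the prefix-table-then-pairwise-differences enumeration by a single left-to-right DP pass that maintains the list of sums of subarrays ending at the current element (extend all by the new element, append the element) and pours each batch into the set; no index loops and no prefix array.
import Mathlib
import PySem

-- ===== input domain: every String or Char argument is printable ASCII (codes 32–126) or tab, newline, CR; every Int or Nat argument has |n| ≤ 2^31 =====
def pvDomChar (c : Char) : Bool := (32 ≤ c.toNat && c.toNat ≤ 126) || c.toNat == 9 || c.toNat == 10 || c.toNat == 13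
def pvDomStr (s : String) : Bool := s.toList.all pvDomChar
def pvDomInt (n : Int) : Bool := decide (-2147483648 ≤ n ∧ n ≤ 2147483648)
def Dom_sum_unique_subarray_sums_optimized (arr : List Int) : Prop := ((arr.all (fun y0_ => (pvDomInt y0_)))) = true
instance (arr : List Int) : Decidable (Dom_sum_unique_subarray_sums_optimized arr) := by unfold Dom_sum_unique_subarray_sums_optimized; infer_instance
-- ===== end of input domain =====

-- B replaces A's prefix-table-then-pairwise-differences enumeration by a single left-to-right
-- DP pass maintaining the sums of subarrays ending at the current element; same asymptotic cost.

-- ===== PORT A =====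
-- the prefix-sum building loop of A
def pvPrefix (arr : List Int) : List Int :=
  (PySem.List.pyRange 0 (arr.length : Int) 1).foldl
    (fun ps i => PySem.List.pySetD ps (i + 1) (PySem.List.pyGetD ps i 0 + PySem.List.pyGetD arr i 0))
    (PySem.List.pyRepeat [(0 : Int)] ((arr.length : Int) + 1))

def sum_unique_subarray_sums_optimized (arr : List Int) : Int :=
  let n : Int := arr.length
  let prefix_sum : List Int := pvPrefix arr
  let unique_sums : PySem.Set Int :=
    (PySem.List.pyRange 0 n 1).foldl
      (fun us i =>
        (PySem.List.pyRange i n 1).foldl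
          (fun us j =>
            PySem.Set.add us
              (PySem.List.pyGetD prefix_sum (j + 1) 0 - PySem.List.pyGetD prefix_sum i 0))
          us)
      PySem.Set.empty
  unique_sums.sum

-- ===== PORT B =====
-- one iteration of B's for-loop: extend every sum ending at the previous element by x,
-- start the fresh subarray [x], and pour the batch into the set
def pvStep (st : List Int × PySem.Set Int) (x : Int) : List Int × PySem.Set Int :=
  let ending_here := st.1.map (fun s => s + x) ++ [x]
  (ending_here, PySem.Set.update st.2 ending_here)

def sum_unique_subarray_sums_optimized_alt (arr : List Int) : Int :=
  (arr.foldl pvStep ([], PySem.Set.empty)).2.sum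

-- ===== PRECONDITION & SPEC =====
def Spec_sum_unique_subarray_sums_optimized (arr : List Int) (out : Int) : Prop := out = sum_unique_subarray_sums_optimized_alt arr
instance (arr : List Int) (out : Int) : Decidable (Spec_sum_unique_subarray_sums_optimized arr out) := by unfold Spec_sum_unique_subarray_sums_optimized; infer_instance

-- ===== CLAIM (what is proved, stated in full; the proofs are below) =====
def Claim_equal_sum_unique_subarray_sums_optimized : Prop := ∀ (arr : List Int), Dom_sum_unique_subarray_sums_optimized arr → Spec_sum_unique_subarray_sums_optimized arr (sum_unique_subarray_sums_optimized arr)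

-- ===== LEMMAS AND PROOFS =====

-- the common description of the two sets: y is the sum of some nonempty contiguous slice
def pvIsSubSum (arr : List Int) (y : Int) : Prop :=
  ∃ j, j ≤ arr.length ∧ ∃ i, i < j ∧ y = (arr.take j).sum - (arr.take i).sum

-- generic: membership through a fold of set-growing steps
theorem pv_mem_foldl_step {α β : Type} [BEq β] [LawfulBEq β]
    (step : PySem.Set β → α → PySem.Set β) (Q : α → β → Prop)
    (h : ∀ s x y, y ∈ step s x ↔ y ∈ s ∨ Q x y) (l : List α) (S : PySem.Set β) (y : β) :
    y ∈ l.foldl step S ↔ y ∈ S ∨ ∃ x ∈ l, Q x y := by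
  induction l generalizing S with
  | nil => simp
  | cons a l ih =>
    simp only [List.foldl_cons, ih, h, List.mem_cons]
    constructor
    · rintro ((hm | hq) | ⟨x, hx, hQ⟩)
      exacts [Or.inl hm, Or.inr ⟨a, Or.inl rfl, hq⟩, Or.inr ⟨x, Or.inr hx, hQ⟩]
    · rintro (hm | ⟨x, hx | hx, hQ⟩)
      · exact Or.inl (Or.inl hm)
      · subst hx; exact Or.inl (Or.inr hQ)
      · exact Or.inr ⟨x, hx, hQ⟩

-- generic: nodup through a fold of nodup-preserving steps
theorem pv_nodup_foldl_step {α β : Type} (step : List β → α → List β)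
    (h : ∀ s x, s.Nodup → (step s x).Nodup) (l : List α) (S : List β) (hS : S.Nodup) :
    (l.foldl step S).Nodup := by
  induction l generalizing S with
  | nil => exact hS
  | cons a l ih => exact ih _ (h _ _ hS)

theorem pv_nodup_update {β : Type} [BEq β] [LawfulBEq β] (s : PySem.Set β) (l : List β)
    (hs : s.Nodup) : (PySem.Set.update s l).Nodup :=
  pv_nodup_foldl_step PySem.Set.add (fun _ _ h => PySem.Set.nodup_add _ _ h) l s hs

-- the table A builds: entry k holds the sum of the first k elements
theorem pvPrefix_build (arr : List Int) (m : Nat) (hm : m ≤ arr.length) :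
    (PySem.List.pyRange 0 (m : Int) 1).foldl
      (fun ps i => PySem.List.pySetD ps (i + 1) (PySem.List.pyGetD ps i 0 + PySem.List.pyGetD arr i 0))
      (PySem.List.pyRepeat [(0 : Int)] ((arr.length : Int) + 1))
    = (List.range (arr.length + 1)).map (fun k => if k ≤ m then (arr.take k).sum else 0) := by
  induction m with
  | zero =>
    rw [show ((0:Nat):Int) = 0 by norm_cast, PySem.List.pyRange_zero]
    simp only [Int.toNat_zero, List.range_zero, List.map_nil, List.foldl_nil]
    rw [PySem.List.pyRepeat_singleton]
    apply List.ext_getElem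
    · simp
    · intro k h1 h2
      simp only [List.getElem_replicate, List.getElem_map, List.getElem_range]
      split
      · next h => interval_cases k; simp
      · rfl
  | succ m ih =>
    have h1 : ((m+1 : Nat) : Int) = (m : Int) + 1 := by push_cast; ring
    rw [h1, PySem.List.pyRange_one_succ_right (by positivity), List.foldl_append]
    rw [ih (by omega)]
    simp only [List.foldl_cons, List.foldl_nil]
    rw [show ((m:Int)+1) = ((m+1 : Nat) : Int) by push_cast; ring]
    rw [PySem.List.pySetD_natCast]
    have hget : PySem.List.pyGetD ((List.range (arr.length + 1)).map (fun k => if k ≤ m then (arr.take k).sum else 0)) (m : Int) 0 = (arr.take m).sum := by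
      rw [PySem.List.pyGetD_natCast]
      rw [List.getD_eq_getElem?_getD]
      rw [List.getElem?_eq_getElem (by simp; omega)]
      simp
    have hgeta : PySem.List.pyGetD arr (m : Int) 0 = arr[m]'(by omega) := by
      rw [PySem.List.pyGetD_natCast, List.getD_eq_getElem?_getD, List.getElem?_eq_getElem (by omega)]
      rfl
    rw [hget, hgeta]
    apply List.ext_getElem
    · simp
    · intro k h1 h2
      simp only [List.getElem_set, List.getElem_map, List.getElem_range]
      by_cases hk : k = m + 1
      · subst hk
        rw [if_pos (by omega), if_pos (le_refl _), List.sum_take_succ arr m (by omega)]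
      · rw [if_neg (by omega)]
        have h3 : (k ≤ m) ↔ (k ≤ m + 1) := by omega
        simp only [h3]

theorem pvPrefix_get (arr : List Int) (t : Int) (h0 : 0 ≤ t) (h1 : t ≤ (arr.length : Int)) :
    PySem.List.pyGetD (pvPrefix arr) t 0 = (arr.take t.toNat).sum := by
  unfold pvPrefix
  rw [pvPrefix_build arr arr.length (le_refl _)]
  rw [PySem.List.pyGetD_eq_getElem]
  · simp only [List.getElem_map, List.getElem_range]
    rw [if_pos (by omega)]
  · exact h0
  · simp only [List.length_map, List.length_range]; push_cast; omega

-- membership in A's set is exactly pvIsSubSum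
theorem pvA_mem (arr : List Int) (y : Int) :
    y ∈ (PySem.List.pyRange 0 (arr.length : Int) 1).foldl
      (fun us i =>
        (PySem.List.pyRange i (arr.length : Int) 1).foldl
          (fun us j =>
            PySem.Set.add us
              (PySem.List.pyGetD (pvPrefix arr) (j + 1) 0 - PySem.List.pyGetD (pvPrefix arr) i 0))
          us)
      PySem.Set.empty
    ↔ pvIsSubSum arr y := by
  have hinner : ∀ (s : PySem.Set Int) (i y : Int),
      y ∈ (PySem.List.pyRange i (arr.length : Int) 1).foldl
        (fun us j => PySem.Set.add us
          (PySem.List.pyGetD (pvPrefix arr) (j + 1) 0 - PySem.List.pyGetD (pvPrefix arr) i 0)) s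
      ↔ y ∈ s ∨ ∃ j ∈ PySem.List.pyRange i (arr.length : Int) 1,
          y = PySem.List.pyGetD (pvPrefix arr) (j + 1) 0 - PySem.List.pyGetD (pvPrefix arr) i 0 :=
    fun s i y => pv_mem_foldl_step
      (fun us j => PySem.Set.add us
        (PySem.List.pyGetD (pvPrefix arr) (j + 1) 0 - PySem.List.pyGetD (pvPrefix arr) i 0))
      (fun j y => y = PySem.List.pyGetD (pvPrefix arr) (j + 1) 0 - PySem.List.pyGetD (pvPrefix arr) i 0)
      (fun s j y => PySem.Set.mem_add s
        (PySem.List.pyGetD (pvPrefix arr) (j + 1) 0 - PySem.List.pyGetD (pvPrefix arr) i 0) y) _ s y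
  rw [pv_mem_foldl_step _ _ hinner]
  constructor
  · rintro (h | ⟨i, hi, j, hj, hy⟩)
    · simp [PySem.Set.empty] at h
    · rw [PySem.List.mem_pyRange_one] at hi hj
      refine ⟨(j + 1).toNat, by omega, i.toNat, by omega, ?_⟩
      rw [hy, pvPrefix_get arr (j + 1) (by omega) (by omega),
        pvPrefix_get arr i (by omega) (by omega)]
  · rintro ⟨j, hj, i, hij, hy⟩
    refine Or.inr ⟨(i : Int), ?_, ((j : Int) - 1), ?_, ?_⟩
    · rw [PySem.List.mem_pyRange_one]; omega
    · rw [PySem.List.mem_pyRange_one]; omega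
    · rw [show ((j : Int) - 1 + 1) = (j : Int) by ring,
        pvPrefix_get arr (j : Int) (by omega) (by omega),
        pvPrefix_get arr (i : Int) (by omega) (by omega)]
      simpa using hy

-- B's maintained list after consuming p: the sums of subarrays ending at p's last element
theorem pvB_fst (p : List Int) :
    (p.foldl pvStep ([], PySem.Set.empty)).1
      = (List.range p.length).map (fun i => (p.drop i).sum) := by
  induction p using List.reverseRecOn with
  | nil => simp
  | append_singleton p x ih =>
    rw [List.foldl_append, List.foldl_cons, List.foldl_nil]
    show ((p.foldl pvStep ([], PySem.Set.empty)).1.map (fun s => s + x) ++ [x]) = _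
    rw [ih, List.length_append, List.length_singleton, List.range_succ, List.map_append,
      List.map_map]
    congr 1
    · apply List.map_congr_left
      intro i hi
      rw [List.mem_range] at hi
      simp only [Function.comp_apply]
      rw [List.drop_append_of_le_length (by omega), List.sum_append, List.sum_singleton]
    · simp

-- membership in B's set after consuming p is exactly pvIsSubSum p
theorem pvB_snd (p : List Int) (y : Int) :
    y ∈ (p.foldl pvStep ([], PySem.Set.empty)).2 ↔ pvIsSubSum p y := by
  induction p using List.reverseRecOn with
  | nil =>
    simp only [List.foldl_nil, pvIsSubSum]
    constructor
    · intro h; simp [PySem.Set.empty] at h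
    · rintro ⟨j, hj, i, hij, _⟩
      simp only [List.length_nil] at hj
      omega
  | append_singleton p x ih =>
    rw [List.foldl_append, List.foldl_cons, List.foldl_nil]
    show y ∈ PySem.Set.update (p.foldl pvStep ([], PySem.Set.empty)).2
        ((p.foldl pvStep ([], PySem.Set.empty)).1.map (fun s => s + x) ++ [x]) ↔ _
    have hfst : ((p.foldl pvStep ([], PySem.Set.empty)).1.map (fun s => s + x) ++ [x])
        = ((p ++ [x]).foldl pvStep ([], PySem.Set.empty)).1 := by
      rw [List.foldl_append, List.foldl_cons, List.foldl_nil]; rfl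
    rw [hfst, pvB_fst, PySem.Set.mem_update, ih]
    have hq : (p ++ [x]).length = p.length + 1 := by simp
    constructor
    · rintro (⟨j, hj, i, hij, hy⟩ | hmem)
      · exact ⟨j, by omega, i, hij, by
          rw [List.take_append_of_le_length (by omega),
            List.take_append_of_le_length (by omega)] at *
          exact hy⟩
      · rw [List.mem_map] at hmem
        obtain ⟨i, hi, hy⟩ := hmem
        rw [List.mem_range] at hi
        refine ⟨(p ++ [x]).length, le_refl _, i, by omega, ?_⟩
        rw [List.take_length]
        have := List.sum_take_add_sum_drop (p ++ [x]) i
        omega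
    · rintro ⟨j, hj, i, hij, hy⟩
      rw [hq] at hj
      by_cases hjp : j ≤ p.length
      · refine Or.inl ⟨j, hjp, i, hij, ?_⟩
        rw [List.take_append_of_le_length (by omega),
          List.take_append_of_le_length (by omega)] at hy
        exact hy
      · refine Or.inr ?_
        rw [List.mem_map]
        refine ⟨i, by rw [List.mem_range]; omega, ?_⟩
        have hjq : j = (p ++ [x]).length := by simp; omega
        rw [hjq, List.take_length] at hy
        have := List.sum_take_add_sum_drop (p ++ [x]) i
        omega

theorem pvB_nodup (arr : List Int) : ((arr.foldl pvStep ([], PySem.Set.empty)).2).Nodup := by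
  induction arr using List.reverseRecOn with
  | nil => exact List.nodup_nil
  | append_singleton p x ih =>
    rw [List.foldl_append, List.foldl_cons, List.foldl_nil]
    exact pv_nodup_update _ _ ih

-- ===== VERDICT (by name: the statement is the Claim_ definition above) =====
theorem sum_unique_subarray_sums_optimized_spec : Claim_equal_sum_unique_subarray_sums_optimized := by
  intro arr _
  unfold Spec_sum_unique_subarray_sums_optimized
  simp only [sum_unique_subarray_sums_optimized, sum_unique_subarray_sums_optimized_alt]
  have hAnd : ((PySem.List.pyRange 0 (arr.length : Int) 1).foldl
      (fun us i =>
        (PySem.List.pyRange i (arr.length : Int) 1).foldl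
          (fun us j =>
            PySem.Set.add us
              (PySem.List.pyGetD (pvPrefix arr) (j + 1) 0 - PySem.List.pyGetD (pvPrefix arr) i 0))
          us)
      PySem.Set.empty).Nodup := by
    apply pv_nodup_foldl_step
    · intro s i hs
      apply pv_nodup_foldl_step
      · intro s j hs; exact PySem.Set.nodup_add _ _ hs
      · exact hs
    · exact List.nodup_nil
  have hBnd := pvB_nodup arr
  have hperm : List.Perm
      ((PySem.List.pyRange 0 (arr.length : Int) 1).foldl
        (fun us i =>
          (PySem.List.pyRange i (arr.length : Int) 1).foldl
            (fun us j =>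
              PySem.Set.add us
                (PySem.List.pyGetD (pvPrefix arr) (j + 1) 0 - PySem.List.pyGetD (pvPrefix arr) i 0))
            us)
        PySem.Set.empty)
      ((arr.foldl pvStep ([], PySem.Set.empty)).2) := by
    rw [List.perm_ext_iff_of_nodup hAnd hBnd]
    intro y
    rw [pvA_mem, pvB_snd]
  exact hperm.sum_eq
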